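-- pv_equiv track=rewrite | github.com/dpetrakopoulos/microservices-id-research | scripts/structural_validation.py | get_domain_label
-- ===== SOURCE A (Python) =====
-- def get_domain_label(topic_string):
--     words = []
--     for w in topic_string.split(' + '):
--         if '*' in w:
--             clean_word = w.split('*')[1].strip().replace('"', '')
--             words.append(clean_word)
--
--     if any(x in words for x in ["pet", "visit"]):
--         return "Pet_Visit_Domain"
--     elif any(x in words for x in ["owner", "address", "city"]):
--         return "Owner_Domain"
--     elif any(x in words for x in ["vet", "specialty"]):
--         return "Vet_Domain"
--     else:
--         return "Infra_Abstraction"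
-- ===== SOURCE B (Python) =====
-- KEYWORD_MAP = {
--     "pet": (0, "Pet_Visit_Domain"),
--     "visit": (0, "Pet_Visit_Domain"),
--     "owner": (1, "Owner_Domain"),
--     "address": (1, "Owner_Domain"),
--     "city": (1, "Owner_Domain"),
--     "vet": (2, "Vet_Domain"),
--     "specialty": (2, "Vet_Domain"),
-- }
--
-- def get_domain_label(topic_string):
--     best = None
--     for w in topic_string.split(' + '):
--         if '*' in w:
--             word = w.split('*')[1].strip().replace('"', '')
--             entry = KEYWORD_MAP.get(word)
--             if entry is not None and (best is None or entry[0] < best[0]):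
--                 best = entry
--     return best[1] if best is not None else "Infra_Abstraction"
-- ===== Notes on version B (the rewrite author's own statement) =====
-- stated objective: idiomatic
-- what changed: Instead of building the full words list and then scanning it three times with any() per keyword group, B makes a single pass over the parsed words, looks each word up in a flat keyword->(priority,label) dict, and keeps the entry with the smallest priority, returning its label (or 'Infra_Abstraction' if none matched).
import Mathlib
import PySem

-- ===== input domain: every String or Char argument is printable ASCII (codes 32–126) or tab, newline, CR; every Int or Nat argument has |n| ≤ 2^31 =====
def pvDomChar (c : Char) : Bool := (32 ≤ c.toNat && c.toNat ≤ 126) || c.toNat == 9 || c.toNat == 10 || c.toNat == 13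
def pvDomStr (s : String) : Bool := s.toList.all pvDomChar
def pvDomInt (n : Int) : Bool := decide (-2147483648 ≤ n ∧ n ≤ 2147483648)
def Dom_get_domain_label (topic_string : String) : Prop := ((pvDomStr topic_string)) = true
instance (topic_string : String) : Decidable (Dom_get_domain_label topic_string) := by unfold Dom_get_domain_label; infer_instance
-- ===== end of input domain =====

-- B replaces A's three `any(x in words …)` group scans by a single pass over the parsed
-- words with a keyword→(priority, label) dict and a best-priority accumulator (idiomatic).

-- ===== PORT A =====
-- w.split('*')[1].strip().replace('"', '')  (the [1] index is guarded by '*' in w, so pyGet? is some; getD "" is unreachable)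
def pvClean (w : String) : String :=
  PySem.Str.replace
    (PySem.Str.strip ((PySem.List.pyGet? ((PySem.Str.split? w "*").getD []) 1).getD ""))
    "\"" ""

def get_domain_label (topic_string : String) : String :=
  let words := ((PySem.Str.split? topic_string " + ").getD []).foldl
    (fun acc w => if PySem.Str.isIn "*" w then acc ++ [pvClean w] else acc) []
  if ["pet", "visit"].any (fun x => words.contains x) then "Pet_Visit_Domain"
  else if ["owner", "address", "city"].any (fun x => words.contains x) then "Owner_Domain"
  else if ["vet", "specialty"].any (fun x => words.contains x) then "Vet_Domain"
  else "Infra_Abstraction"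

-- ===== PORT B =====
def pvKeywordMap : PySem.Dict String (Int × String) :=
  PySem.Dict.mk
    [ ("pet", (0, "Pet_Visit_Domain")), ("visit", (0, "Pet_Visit_Domain")),
      ("owner", (1, "Owner_Domain")), ("address", (1, "Owner_Domain")), ("city", (1, "Owner_Domain")),
      ("vet", (2, "Vet_Domain")), ("specialty", (2, "Vet_Domain")) ]

-- loop body of Source B: look the cleaned word up, keep the entry with the smallest priority
def pvStep (best : Option (Int × String)) (w : String) : Option (Int × String) :=
  if PySem.Str.isIn "*" w then
    match pvKeywordMap.get? (pvClean w) with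
    | none => best
    | some entry =>
      match best with
      | none => some entry
      | some b => if entry.1 < b.1 then some entry else some b
  else best

def get_domain_label_alt (topic_string : String) : String :=
  match ((PySem.Str.split? topic_string " + ").getD []).foldl pvStep none with
  | some b => b.2
  | none => "Infra_Abstraction"

-- ===== PRECONDITION & SPEC =====
def Spec_get_domain_label (topic_string : String) (out : String) : Prop := out = get_domain_label_alt topic_string
instance (topic_string : String) (out : String) : Decidable (Spec_get_domain_label topic_string out) := by unfold Spec_get_domain_label; infer_instance

-- ===== CLAIM (what is proved, stated in full; the proofs are below) =====
def Claim_equal_get_domain_label : Prop := ∀ (topic_string : String), Dom_get_domain_label topic_string → Spec_get_domain_label topic_string (get_domain_label topic_string)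

-- ===== LEMMAS AND PROOFS =====

-- merge two optional (priority, label) entries; the second wins only on strictly smaller priority
def pvMerge (a b : Option (Int × String)) : Option (Int × String) :=
  match b with
  | none => a
  | some e =>
    match a with
    | none => some e
    | some x => if e.1 < x.1 then some e else some x

-- best keyword match (smallest priority) over a list of words
def pvR : List String → Option (Int × String)
  | [] => none
  | w :: ws => pvMerge (pvKeywordMap.get? w) (pvR ws)

theorem pvMerge_none (b : Option (Int × String)) : pvMerge none b = b := by
  cases b <;> rfl

theorem pvMerge_assoc (a b c : Option (Int × String)) :
    pvMerge (pvMerge a b) c = pvMerge a (pvMerge b c) := by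
  rcases a with _ | x <;> rcases b with _ | y <;> rcases c with _ | z <;> try rfl
  · simp only [pvMerge]; split_ifs <;> rfl
  · by_cases h1 : y.1 < x.1 <;> by_cases h2 : z.1 < y.1 <;> by_cases h3 : z.1 < x.1 <;>
      simp [pvMerge, h1, h2, h3] <;> (try exfalso) <;> omega

-- Source B's loop body is a pvMerge with the dict lookup
theorem pvStep_eq (a : Option (Int × String)) (w : String) :
    pvStep a w = if PySem.Str.isIn "*" w then pvMerge a (pvKeywordMap.get? (pvClean w)) else a := by
  generalize h : pvKeywordMap.get? (pvClean w) = e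
  unfold pvStep
  rw [h]
  by_cases hw : PySem.Str.isIn "*" w
  · rcases e with _ | e <;> rcases a with _ | x <;> simp [pvMerge, hw]
  · simp only [if_neg hw]

theorem foldl_pvMerge (ws : List String) :
    ∀ a : Option (Int × String),
      ws.foldl (fun acc w => pvMerge acc (pvKeywordMap.get? w)) a = pvMerge a (pvR ws) := by
  induction ws with
  | nil => intro a; rfl
  | cons w ws ih =>
    intro a
    simp only [List.foldl_cons, ih, pvR, pvMerge_assoc]

-- the best-priority accumulator over a word list, characterised by A's group membership tests
theorem pvR_char (ws : List String) :
    pvR ws =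
      if ws.contains "pet" || ws.contains "visit" then some (0, "Pet_Visit_Domain")
      else if ws.contains "owner" || ws.contains "address" || ws.contains "city" then some (1, "Owner_Domain")
      else if ws.contains "vet" || ws.contains "specialty" then some (2, "Vet_Domain")
      else none := by
  induction ws with
  | nil => rfl
  | cons w ws ih =>
    simp only [pvR, ih, List.contains_cons]
    by_cases h1 : w = "pet"
    · subst h1
      have hk : pvKeywordMap.get? "pet" = some (0, "Pet_Visit_Domain") := rfl
      rw [hk]; split_ifs <;> simp_all [pvMerge]
    by_cases h2 : w = "visit"
    · subst h2
      have hk : pvKeywordMap.get? "visit" = some (0, "Pet_Visit_Domain") := rfl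
      rw [hk]; split_ifs <;> simp_all [pvMerge]
    by_cases h3 : w = "owner"
    · subst h3
      have hk : pvKeywordMap.get? "owner" = some (1, "Owner_Domain") := rfl
      rw [hk]; split_ifs <;> simp_all [pvMerge]
    by_cases h4 : w = "address"
    · subst h4
      have hk : pvKeywordMap.get? "address" = some (1, "Owner_Domain") := rfl
      rw [hk]; split_ifs <;> simp_all [pvMerge]
    by_cases h5 : w = "city"
    · subst h5
      have hk : pvKeywordMap.get? "city" = some (1, "Owner_Domain") := rfl
      rw [hk]; split_ifs <;> simp_all [pvMerge]
    by_cases h6 : w = "vet"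
    · subst h6
      have hk : pvKeywordMap.get? "vet" = some (2, "Vet_Domain") := rfl
      rw [hk]; split_ifs <;> simp_all [pvMerge]
    by_cases h7 : w = "specialty"
    · subst h7
      have hk : pvKeywordMap.get? "specialty" = some (2, "Vet_Domain") := rfl
      rw [hk]; split_ifs <;> simp_all [pvMerge]
    have hg : pvKeywordMap.get? w = none := by
      simp [pvKeywordMap, PySem.Dict.get?_mk_cons, beq_iff_eq,
        Ne.symm h1, Ne.symm h2, Ne.symm h3, Ne.symm h4, Ne.symm h5, Ne.symm h6, Ne.symm h7]
      rfl
    rw [hg, pvMerge_none]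
    simp [Ne.symm h1, Ne.symm h2, Ne.symm h3, Ne.symm h4, Ne.symm h5, Ne.symm h6, Ne.symm h7]

-- A's group tests against B's best-priority result, over one common word list
theorem pvFinal (ws : List String) :
    (if ["pet", "visit"].any (fun x => ws.contains x) then "Pet_Visit_Domain"
     else if ["owner", "address", "city"].any (fun x => ws.contains x) then "Owner_Domain"
     else if ["vet", "specialty"].any (fun x => ws.contains x) then "Vet_Domain"
     else "Infra_Abstraction") =
    (match (if ws.contains "pet" || ws.contains "visit" then some ((0 : Int), "Pet_Visit_Domain")
            else if ws.contains "owner" || ws.contains "address" || ws.contains "city" then some ((1 : Int), "Owner_Domain")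
            else if ws.contains "vet" || ws.contains "specialty" then some ((2 : Int), "Vet_Domain")
            else none) with
     | some b => b.2
     | none => "Infra_Abstraction") := by
  simp only [List.any_cons, List.any_nil, Bool.or_false, Bool.or_assoc]
  split_ifs <;> rfl

-- ===== VERDICT (by name: the statement is the Claim_ definition above) =====
theorem get_domain_label_spec : Claim_equal_get_domain_label := by
  intro topic_string _
  unfold Spec_get_domain_label get_domain_label get_domain_label_alt
  have hstep : ((PySem.Str.split? topic_string " + ").getD []).foldl pvStep none =
      ((PySem.Str.split? topic_string " + ").getD []).foldl
        (fun a w => if PySem.Str.isIn "*" w then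
          pvMerge a (pvKeywordMap.get? (pvClean w)) else a) none := by
    apply PySem.List.foldl_congr_mem
    intro a w _
    exact pvStep_eq a w
  rw [PySem.List.foldl_append_if, hstep, PySem.List.foldl_if_eq_foldl_filter,
    ← List.foldl_map (f := pvClean) (g := fun acc w => pvMerge acc (pvKeywordMap.get? w)),
    foldl_pvMerge, pvMerge_none, pvR_char]
  exact pvFinal _
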